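-- pv_equiv track=rewrite | github.com/mushbear/material_remake_tool | scripts/cut_videos_blur_subtitles.py | select_best_segment
-- ===== SOURCE A (Python) =====
-- from typing import List, Dict, Any, Optional, Set
--
-- def select_best_segment(segments: List[Dict[str, Any]]) -> Optional[Dict[str, Any]]:
--     """选择最佳片段"""
--     if not segments:
--         return None
--
--     scored_segments = []
--
--     for seg in segments:
--         duration = seg.get('duration', 0)
--         if 30 <= duration <= 120:
--             score = 100
--         elif 15 <= duration < 30:
--             score = 80
--         elif 120 < duration <= 180:
--             score = 70
--         elif duration < 15:
--             score = 50
--         else: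
--             score = 30
--
--         scored_segments.append((score, seg))
--
--     scored_segments.sort(key=lambda x: x[0], reverse=True)
--     return scored_segments[0][1]
-- ===== SOURCE B (Python) =====
-- from typing import List, Dict, Any, Optional
--
--
-- def _score(seg: Dict[str, Any]) -> int:
--     duration = seg.get('duration', 0)
--     if 30 <= duration <= 120:
--         return 100
--     elif 15 <= duration < 30:
--         return 80
--     elif 120 < duration <= 180:
--         return 70
--     elif duration < 15:
--         return 50
--     else:
--         return 30
--
--
-- def select_best_segment(segments: List[Dict[str, Any]]) -> Optional[Dict[str, Any]]:
--     """Single pass: keep the first segment with the highest score (no sort)."""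
--     if not segments:
--         return None
--     best = segments[0]
--     best_score = _score(best)
--     for seg in segments[1:]:
--         s = _score(seg)
--         if s > best_score:
--             best, best_score = seg, s
--     return best
-- ===== Notes on version B (the rewrite author's own statement) =====
-- stated objective: simpler
-- what changed: Replaced build-score-list + stable descending sort + take-first with a single linear pass that tracks the first segment attaining the maximal score (stable sort's tie rule = keep first occurrence); not measurably faster since Timsort is near-linear on the few distinct score values.
import Mathlib
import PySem

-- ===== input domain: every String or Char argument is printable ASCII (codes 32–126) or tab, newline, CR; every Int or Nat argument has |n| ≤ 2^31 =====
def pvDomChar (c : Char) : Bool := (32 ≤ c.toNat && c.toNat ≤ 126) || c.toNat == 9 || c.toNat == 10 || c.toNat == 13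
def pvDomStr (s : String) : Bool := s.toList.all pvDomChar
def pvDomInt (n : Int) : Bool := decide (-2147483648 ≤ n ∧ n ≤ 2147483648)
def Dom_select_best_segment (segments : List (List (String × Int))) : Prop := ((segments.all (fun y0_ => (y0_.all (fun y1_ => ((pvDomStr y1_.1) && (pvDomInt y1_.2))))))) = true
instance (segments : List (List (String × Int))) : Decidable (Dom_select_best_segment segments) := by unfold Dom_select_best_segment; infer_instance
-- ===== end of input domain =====

-- B replaces score-list + stable descending sort + take-first by one pass keeping the
-- first segment of maximal score (simpler; same values, stable-sort tie rule = first wins).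
-- ===== PORT A =====
-- shared scoring logic (identical in Source A and Source B): duration-bucket score
def pvScore (seg : List (String × Int)) : Int :=
  let duration := PySem.Dict.getD ⟨seg⟩ "duration" (0 : Int)
  if 30 ≤ duration ∧ duration ≤ 120 then 100
  else if 15 ≤ duration ∧ duration < 30 then 80
  else if 120 < duration ∧ duration ≤ 180 then 70
  else if duration < 15 then 50
  else 30

-- A: build (score, seg) list, stable sort descending by score, return first
def select_best_segment (segments : List (List (String × Int))) : Option (List (String × Int)) :=
  if segments = [] then none
  else
    let scored_segments := segments.foldl (fun acc seg => acc ++ [(pvScore seg, seg)]) []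
    let sorted := PySem.List.sorted scored_segments (fun x => x.1) true
    (PySem.List.pyGet? sorted 0).map (fun x => x.2)

-- ===== PORT B =====
-- B: one pass, keep the first segment with the highest score
def select_best_segment_alt (segments : List (List (String × Int))) : Option (List (String × Int)) :=
  match segments with
  | [] => none
  | s :: rest =>
    some (rest.foldl
      (fun best seg => if best.1 < pvScore seg then (pvScore seg, seg) else best)
      (pvScore s, s)).2

-- ===== PRECONDITION & SPEC =====
def Spec_select_best_segment (segments : List (List (String × Int))) (out : Option (List (String × Int))) : Prop := out = select_best_segment_alt segments
instance (segments : List (List (String × Int))) (out : Option (List (String × Int))) : Decidable (Spec_select_best_segment segments out) := by unfold Spec_select_best_segment; infer_instance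

-- ===== CLAIM (what is proved, stated in full; the proofs are below) =====
def Claim_equal_select_best_segment : Prop := ∀ (segments : List (List (String × Int))), Dom_select_best_segment segments → Spec_select_best_segment segments (select_best_segment segments)

-- ===== LEMMAS AND PROOFS =====

-- xs[0] is the head
theorem pvPyGet_zero {α : Type} (l : List α) : PySem.List.pyGet? l (0 : Int) = l.head? := by
  cases l <;> simp [PySem.List.pyGet?, PySem.List.pyIdx?]

-- head of inserting x into a nonempty list under the descending-stable rule
theorem pvHead_insertBy {α : Type} (key : α → Int) (x y : α) (t : List α) :
    PySem.List.insertBy (fun a b => decide (key b < key a)) x (y :: t) =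
      if key y < key x then x :: y :: t
      else y :: PySem.List.insertBy (fun a b => decide (key b < key a)) x t := by
  simp [PySem.List.insertBy]

-- running the insertion-sort fold on a nonempty accumulator: its head is the running first-max
theorem pvFoldl_insertBy_head {α : Type} (key : α → Int) :
    ∀ (l : List α) (y : α) (t : List α),
      (l.foldl (fun acc x => PySem.List.insertBy (fun a b => decide (key b < key a)) x acc)
          (y :: t)).head? =
        some (l.foldl (fun best p => if key best < key p then p else best) y) := by
  intro l
  induction l with
  | nil => intro y t; simp
  | cons p l ih =>
    intro y t
    simp only [List.foldl_cons, pvHead_insertBy key p y t]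
    by_cases h : key y < key p
    · simp only [if_pos h]; exact ih p (y :: t)
    · simp only [if_neg h]; exact ih y _

theorem pvA_eq_B (segments : List (List (String × Int))) :
    select_best_segment segments = select_best_segment_alt segments := by
  cases segments with
  | nil => rfl
  | cons s rest =>
    simp only [select_best_segment, select_best_segment_alt, reduceCtorEq, if_false]
    rw [PySem.List.foldl_append_singleton_eq_map, PySem.List.sorted_rev_eq_foldl_insertBy]
    simp only [List.nil_append, List.map_cons, List.foldl_cons, List.foldl_map]
    have hins : PySem.List.insertBy
        (fun a b : Int × List (String × Int) => decide (b.1 < a.1)) (pvScore s, s) [] =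
        [(pvScore s, s)] := by simp [PySem.List.insertBy]
    rw [hins]
    have := pvFoldl_insertBy_head (fun x : Int × List (String × Int) => x.1)
      (rest.map (fun seg => (pvScore seg, seg))) (pvScore s, s) []
    simp only [List.foldl_map] at this
    rw [pvPyGet_zero, this]
    rfl

-- ===== VERDICT (by name: the statement is the Claim_ definition above) =====
theorem select_best_segment_spec : Claim_equal_select_best_segment := by
  intro segments _
  unfold Spec_select_best_segment
  exact pvA_eq_B segments
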